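-- pv_equiv track=rewrite | github.com/yuukanehiro/paiza | python/mondai/dp_primer/dp_primer_recursive_formula_step3/main.py | get_arithmetic_progression_odd_even
-- ===== SOURCE A (Python) =====
-- from typing import List, Dict, Tuple
--
-- def get_arithmetic_progression_odd_even(x: int, d_1: int, d_2: int, k: int) -> List[int]:
--     dp = [0] * (k + 1)
--     dp[1] = x
--
--     for i in range(2, k + 1):
--         if i % 2 == 0:
--             dp[i] = dp[i - 1] + d_2
--         else:
--             dp[i] = dp[i - 1] + d_1
--
--     return dp
-- ===== SOURCE B (Python) =====
-- def get_arithmetic_progression_odd_even(x: int, d_1: int, d_2: int, k: int):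
--     # closed form: dp[i] = x + (# even steps in 2..i)*d_2 + (# odd steps in 2..i)*d_1
--     return [0] + [x + (i // 2) * d_2 + ((i - 1) // 2) * d_1 for i in range(1, k + 1)]
-- ===== Notes on version B (the rewrite author's own statement) =====
-- stated objective: simpler
-- what changed: Replaces the sequential parity-branching accumulation over a preallocated mutable array with a direct closed-form comprehension computing each cell independently as x + (i//2)*d_2 + ((i-1)//2)*d_1.
import Mathlib
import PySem

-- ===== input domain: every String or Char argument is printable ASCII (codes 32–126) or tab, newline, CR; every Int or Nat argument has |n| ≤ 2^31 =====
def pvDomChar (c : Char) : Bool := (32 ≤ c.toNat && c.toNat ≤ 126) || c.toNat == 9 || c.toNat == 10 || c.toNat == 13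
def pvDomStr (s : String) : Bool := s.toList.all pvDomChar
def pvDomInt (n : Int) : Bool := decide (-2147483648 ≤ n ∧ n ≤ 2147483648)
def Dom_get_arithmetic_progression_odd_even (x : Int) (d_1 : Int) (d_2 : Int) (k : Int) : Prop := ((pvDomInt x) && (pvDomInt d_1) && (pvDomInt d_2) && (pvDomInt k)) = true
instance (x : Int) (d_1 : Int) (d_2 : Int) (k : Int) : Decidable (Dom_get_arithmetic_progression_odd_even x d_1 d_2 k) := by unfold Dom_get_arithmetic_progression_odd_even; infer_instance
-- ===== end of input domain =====

-- B replaces A's sequential parity-branching accumulation with a closed-form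
-- comprehension computing each cell independently (objective: simpler).

-- ===== PORT A =====
def get_arithmetic_progression_odd_even (x : Int) (d_1 : Int) (d_2 : Int) (k : Int) : List Int :=
  let dp := List.replicate (k + 1).toNat (0 : Int)
  let dp := PySem.List.pySetD dp 1 x
  (PySem.List.pyRange 2 (k + 1) 1).foldl
    (fun dp i =>
      if PySem.Int.mod i 2 == 0 then
        PySem.List.pySetD dp i (PySem.List.pyGetD dp (i - 1) 0 + d_2)
      else
        PySem.List.pySetD dp i (PySem.List.pyGetD dp (i - 1) 0 + d_1))
    dp

-- ===== PORT B =====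
def get_arithmetic_progression_odd_even_alt (x : Int) (d_1 : Int) (d_2 : Int) (k : Int) : List Int :=
  [0] ++ (PySem.List.pyRange 1 (k + 1) 1).map
    (fun i => x + PySem.Int.floordiv i 2 * d_2 + PySem.Int.floordiv (i - 1) 2 * d_1)

-- ===== PRECONDITION & SPEC =====
-- Pre_ excludes k ≤ 0, where the Python A raises IndexError at dp[1] = x.
def Pre_get_arithmetic_progression_odd_even (x : Int) (d_1 : Int) (d_2 : Int) (k : Int) : Prop := 1 ≤ k
instance (x : Int) (d_1 : Int) (d_2 : Int) (k : Int) : Decidable (Pre_get_arithmetic_progression_odd_even x d_1 d_2 k) := by unfold Pre_get_arithmetic_progression_odd_even; infer_instance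
def pvWitness_get_arithmetic_progression_odd_even : Int × Int × Int × Int := (3, 2, 5, 4)

def Spec_get_arithmetic_progression_odd_even (x : Int) (d_1 : Int) (d_2 : Int) (k : Int) (out : List Int) : Prop := out = get_arithmetic_progression_odd_even_alt x d_1 d_2 k
instance (x : Int) (d_1 : Int) (d_2 : Int) (k : Int) (out : List Int) : Decidable (Spec_get_arithmetic_progression_odd_even x d_1 d_2 k out) := by unfold Spec_get_arithmetic_progression_odd_even; infer_instance

-- ===== CLAIM (what is proved, stated in full; the proofs are below) =====
def Claim_equal_get_arithmetic_progression_odd_even : Prop := ∀ (x : Int) (d_1 : Int) (d_2 : Int) (k : Int), Dom_get_arithmetic_progression_odd_even x d_1 d_2 k → Pre_get_arithmetic_progression_odd_even x d_1 d_2 k → Spec_get_arithmetic_progression_odd_even x d_1 d_2 k (get_arithmetic_progression_odd_even x d_1 d_2 k)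

-- ===== LEMMAS AND PROOFS =====

-- the closed-form value of dp[i] (Nat index)
def pvCell (x d_1 d_2 : Int) (i : Nat) : Int :=
  if i = 0 then 0 else x + (i / 2 : Nat) * d_2 + ((i - 1) / 2 : Nat) * d_1

lemma pvCell_step (x d_1 d_2 : Int) (i : Nat) (hi : 2 ≤ i) :
    pvCell x d_1 d_2 i
      = pvCell x d_1 d_2 (i - 1) + (if i % 2 = 0 then d_2 else d_1) := by
  rcases Nat.even_or_odd i with ⟨m, hm⟩ | ⟨m, hm⟩
  · subst hm
    have hm1 : 1 ≤ m := by omega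
    have h1 : (m + m) / 2 = m := by omega
    have h2 : (m + m - 1) / 2 = m - 1 := by omega
    have h3 : (m + m - 1 - 1) / 2 = m - 1 := by omega
    have h4 : (m + m) % 2 = 0 := by omega
    simp only [pvCell, h1, h2, h3, h4]
    have : m + m ≠ 0 := by omega
    simp only [this, if_false]
    have : m + m - 1 ≠ 0 := by omega
    simp only [this, if_false]
    have hc : ((m - 1 : Nat) : Int) = (m : Int) - 1 := by omega
    rw [hc]; norm_num; ring
  · subst hm
    have h1 : (2 * m + 1) / 2 = m := by omega
    have h2 : (2 * m + 1 - 1) / 2 = m := by omega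
    have h3 : (2 * m + 1 - 1 - 1) / 2 = m - 1 := by omega
    have h4 : (2 * m + 1) % 2 ≠ 0 := by omega
    have hm1 : 1 ≤ m := by omega
    simp only [pvCell, h1, h2, h3, h4]
    have : 2 * m + 1 ≠ 0 := by omega
    simp only [this, if_false]
    have : 2 * m + 1 - 1 ≠ 0 := by omega
    simp only [this, if_false]
    have hc : ((m - 1 : Nat) : Int) = (m : Int) - 1 := by omega
    rw [hc]; ring

-- one loop step of A preserves the invariant
lemma pvStep (x d_1 d_2 : Int) (n i : Nat) (hi : 2 ≤ i) (hin : i < n) :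
    (fun dp (j : Int) =>
      if PySem.Int.mod j 2 == 0 then
        PySem.List.pySetD dp j (PySem.List.pyGetD dp (j - 1) 0 + d_2)
      else
        PySem.List.pySetD dp j (PySem.List.pyGetD dp (j - 1) 0 + d_1))
      ((List.range i).map (pvCell x d_1 d_2) ++ List.replicate (n - i) 0) (i : Int)
    = (List.range (i + 1)).map (pvCell x d_1 d_2) ++ List.replicate (n - (i + 1)) 0 := by
  set t := pvCell x d_1 d_2 with ht
  set dp := (List.range i).map t ++ List.replicate (n - i) 0 with hdp
  have hlen : dp.length = n := by
    simp [hdp]; omega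
  have hget : PySem.List.pyGetD dp ((i : Int) - 1) 0 = t (i - 1) := by
    have : ((i : Int) - 1) = ((i - 1 : Nat) : Int) := by omega
    rw [this, PySem.List.pyGetD_natCast]
    have hlt : i - 1 < ((List.range i).map t).length := by simp; omega
    rw [hdp, List.getD_eq_getElem?_getD, List.getElem?_append_left hlt]
    rw [List.getElem?_map, List.getElem?_range (show i - 1 < i by omega)]
    rfl
  have hset : ∀ v : Int, PySem.List.pySetD dp (i : Int) v
      = (List.range i).map t ++ (v :: List.replicate (n - (i + 1)) 0) := by
    intro v
    rw [PySem.List.pySetD_natCast, hdp]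
    have hli : ((List.range i).map t).length = i := by simp
    rw [List.set_append_right _ _ (by simp)]
    have hrep : List.replicate (n - i) (0 : Int) = 0 :: List.replicate (n - (i + 1)) 0 := by
      have : n - i = (n - (i + 1)) + 1 := by omega
      rw [this, List.replicate_succ]
    rw [hli, Nat.sub_self, hrep]
    simp
  have hm : PySem.Int.mod (i : Int) 2 = ((i % 2 : Nat) : Int) := by
    exact_mod_cast PySem.Int.mod_natCast i 2
  have hout : (List.range (i + 1)).map t ++ List.replicate (n - (i + 1)) 0
      = (List.range i).map t ++ (t i :: List.replicate (n - (i + 1)) 0) := by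
    rw [List.range_succ]; simp
  by_cases hpar : i % 2 = 0
  · simp only [hm, hpar, Nat.cast_zero, beq_self_eq_true, if_true, hget, hset, hout]
    rw [ht, pvCell_step x d_1 d_2 i hi, if_pos hpar]
  · have : ¬ (((i % 2 : Nat) : Int) == 0) = true := by
      simp; omega
    simp only [hm, this, hget, hset, hout]
    simp only [Bool.false_eq_true, if_false]
    rw [ht, pvCell_step x d_1 d_2 i hi, if_neg hpar]

-- the loop invariant, by induction on the number of processed indices
lemma pvLoop (x d_1 d_2 : Int) (n j : Nat) (h : 2 + j ≤ n) :
    (PySem.List.pyRange 2 (2 + (j : Int)) 1).foldl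
      (fun dp (i : Int) =>
        if PySem.Int.mod i 2 == 0 then
          PySem.List.pySetD dp i (PySem.List.pyGetD dp (i - 1) 0 + d_2)
        else
          PySem.List.pySetD dp i (PySem.List.pyGetD dp (i - 1) 0 + d_1))
      ((List.range 2).map (pvCell x d_1 d_2) ++ List.replicate (n - 2) 0)
    = (List.range (2 + j)).map (pvCell x d_1 d_2) ++ List.replicate (n - (2 + j)) 0 := by
  induction j with
  | zero => simp [PySem.List.pyRange_one_eq_nil]
  | succ m ih =>
    have hr : PySem.List.pyRange 2 (2 + ((m + 1 : Nat) : Int)) 1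
        = PySem.List.pyRange 2 (2 + (m : Int)) 1 ++ [2 + (m : Int)] := by
      have : (2 + ((m + 1 : Nat) : Int)) = (2 + (m : Int)) + 1 := by push_cast; ring
      rw [this, PySem.List.pyRange_one_succ_right (by omega)]
    rw [hr, List.foldl_append, ih (by omega)]
    have hcast : (2 + (m : Int)) = ((2 + m : Nat) : Int) := by push_cast; ring
    rw [hcast]
    have := pvStep x d_1 d_2 n (2 + m) (by omega) (by omega)
    simpa [Nat.add_comm, Nat.add_assoc, Nat.add_left_comm] using this

-- B's output is the same closed-form table
lemma pvAlt (x d_1 d_2 k : Int) (hk : 1 ≤ k) :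
    get_arithmetic_progression_odd_even_alt x d_1 d_2 k
      = (List.range (k + 1).toNat).map (pvCell x d_1 d_2) := by
  unfold get_arithmetic_progression_odd_even_alt
  obtain ⟨m, hm⟩ : ∃ m : Nat, (k + 1).toNat = m + 1 := ⟨k.toNat, by omega⟩
  have hk1 : k + 1 = ((m + 1 : Nat) : Int) := by omega
  rw [hm, hk1, List.range_succ_eq_map]
  rw [PySem.List.pyRange_one]
  have : ((((m + 1 : Nat) : Int)) - 1).toNat = m := by omega
  rw [this]
  simp only [List.map_map, List.map_cons, List.cons_append, List.nil_append]
  have ht0 : pvCell x d_1 d_2 0 = (0 : Int) := rfl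
  rw [ht0]
  congr 1
  apply List.map_congr_left
  intro a _
  have h1 : (1 : Int) + (a : Int) = ((a + 1 : Nat) : Int) := by push_cast; ring
  simp only [Function.comp_apply, h1]
  have hf1 : PySem.Int.floordiv ((a + 1 : Nat) : Int) 2 = (((a + 1) / 2 : Nat) : Int) := by
    exact_mod_cast PySem.Int.floordiv_natCast (a + 1) 2
  have hf2 : PySem.Int.floordiv (((a + 1 : Nat) : Int) - 1) 2 = ((a / 2 : Nat) : Int) := by
    have : (((a + 1 : Nat) : Int) - 1) = ((a : Nat) : Int) := by push_cast; ring
    rw [this]; exact_mod_cast PySem.Int.floordiv_natCast a 2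
  rw [hf1, hf2]
  simp [pvCell]

-- ===== VERDICT (by name: the statement is the Claim_ definition above) =====
theorem get_arithmetic_progression_odd_even_spec : Claim_equal_get_arithmetic_progression_odd_even := by
  intro x d_1 d_2 k _ hk
  have hk' : (1 : Int) ≤ k := hk
  unfold Spec_get_arithmetic_progression_odd_even
  unfold get_arithmetic_progression_odd_even
  obtain ⟨m, hm⟩ : ∃ m : Nat, (k + 1).toNat = m + 2 := ⟨(k - 1).toNat, by omega⟩
  have hinit : PySem.List.pySetD (List.replicate (k + 1).toNat (0 : Int)) 1 x
      = (List.range 2).map (pvCell x d_1 d_2) ++ List.replicate ((k + 1).toNat - 2) 0 := by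
    rw [PySem.List.pySetD_of_nonneg _ x (show (0:Int) ≤ 1 by norm_num), hm]
    simp [List.replicate_succ, List.range_succ, pvCell]
  simp only [hinit]
  have hk1 : k + 1 = 2 + (((k + 1).toNat - 2 : Nat) : Int) := by omega
  have hloop := pvLoop x d_1 d_2 (k + 1).toNat ((k + 1).toNat - 2) (by omega)
  rw [← hk1] at hloop
  rw [hloop]
  have h2 : 2 + ((k + 1).toNat - 2) = (k + 1).toNat := by omega
  rw [h2, Nat.sub_self, List.replicate_zero, List.append_nil,
    pvAlt x d_1 d_2 k hk']
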